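-- pv_equiv track=rewrite | github.com/kingstonv1/calico | python/cc-fa22/bread.py | solve
-- ===== SOURCE A (Python) =====
-- def solve(timeSpan, menu, days):
--     amounts = set()
--
--     for day in range(timeSpan):
--         count = 0
--
--         for i in range(days):
--             try:
--                 if menu[day + i] == 0:
--                     break
--
--                 count += menu[day + i]
--             except:
--                 pass
--
--         amounts.add(count)
--
--
--     return max(amounts)
-- ===== SOURCE B (Python) =====
-- def solve(timeSpan, menu, days):
--     n = len(menu)
--     # right-to-left pass: rs[i] = sum of the run of consecutive nonzeros starting
--     # at i, zs[i] = length of that run (rs[n] = zs[n] = 0)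
--     rs = [0]
--     zs = [0]
--     for v in reversed(menu):
--         if v == 0:
--             rs.append(0)
--             zs.append(0)
--         else:
--             rs.append(v + rs[-1])
--             zs.append(1 + zs[-1])
--     rs.reverse()
--     zs.reverse()
--     # each window's count in O(1): whole run if it fits, else run minus its tail
--     best = 0 if (days <= 0 or timeSpan > n) else None
--     if days > 0:
--         for day in range(min(timeSpan, n)):
--             c = rs[day] if zs[day] <= days else rs[day] - rs[day + days]
--             if best is None or c > best:
--                 best = c
--     return best
-- ===== Notes on version B (the rewrite author's own statement) =====
-- stated objective: faster
-- what changed: B replaces A's per-day inner scan (O(days) work per starting day, with exceptions swallowing out-of-range indices) by one right-to-left pass computing run sums and run lengths of consecutive nonzeros, after which each window's count is obtained in O(1) as the whole run or the run minus its tail; a running max replaces A's set.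
import Mathlib
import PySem

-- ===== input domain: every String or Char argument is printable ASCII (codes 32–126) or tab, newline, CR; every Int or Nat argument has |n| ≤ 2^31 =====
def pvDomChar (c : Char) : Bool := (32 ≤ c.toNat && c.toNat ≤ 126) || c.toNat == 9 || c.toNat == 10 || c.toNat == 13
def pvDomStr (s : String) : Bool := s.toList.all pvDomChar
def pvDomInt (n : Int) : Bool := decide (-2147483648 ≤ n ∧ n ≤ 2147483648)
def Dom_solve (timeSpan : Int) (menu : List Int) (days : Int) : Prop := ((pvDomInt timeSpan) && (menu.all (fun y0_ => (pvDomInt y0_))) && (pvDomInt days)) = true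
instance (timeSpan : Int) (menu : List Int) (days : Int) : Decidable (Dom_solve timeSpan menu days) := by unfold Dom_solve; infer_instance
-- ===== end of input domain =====

-- B computes each window's count in O(1) from a single right-to-left precomputation
-- (run sums / run lengths of consecutive nonzeros) instead of A's inner scan per day.

-- ===== PORT A =====
-- inner loop of A: for i in range(days): try: if menu[day+i]==0: break; count+=menu[day+i]; except: pass
-- state = (count, broken); an out-of-range index (pyGet? = none) is the caught IndexError, i.e. 'pass'
def solveInner (menu : List Int) (day : Int) (days : Int) : Int :=
  ((PySem.List.pyRange 0 days 1).foldl (fun (st : Int × Bool) i =>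
    if st.2 then st else
    match PySem.List.pyGet? menu (day + i) with
    | none => st
    | some v => if v = 0 then (st.1, true) else (st.1 + v, st.2)) (0, false)).1

def solve (timeSpan : Int) (menu : List Int) (days : Int) : Int :=
  let amounts : PySem.Set Int :=
    (PySem.List.pyRange 0 timeSpan 1).foldl
      (fun amounts day => PySem.Set.add amounts (solveInner menu day days)) PySem.Set.empty
  -- max(amounts); none (empty set, ValueError) is excluded by Pre_solve
  (PySem.List.max? amounts (fun x => x)).getD 0

-- ===== PORT B =====
-- right-to-left pass of Source B (append to the end + final reverse = cons to the front):
-- rs[i] = sum of the run of consecutive nonzeros starting at i, zs[i] = its length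
def buildRZ (menu : List Int) : List Int × List Int :=
  menu.reverse.foldl (fun (p : List Int × List Int) v =>
    if v = 0 then (0 :: p.1, 0 :: p.2)
    else ((v + p.1.headD 0) :: p.1, (1 + p.2.headD 0) :: p.2)) ([0], [0])

-- loop body of Source B's running max: c = rs[day] if zs[day] <= days else rs[day]-rs[day+days]
def altStep (rz : List Int × List Int) (days : Int) (best : Option Int) (day : Int) : Option Int :=
  let c : Int :=
    if PySem.List.pyGetD rz.2 day 0 ≤ days then PySem.List.pyGetD rz.1 day 0
    else PySem.List.pyGetD rz.1 day 0 - PySem.List.pyGetD rz.1 (day + days) 0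
  match best with
  | none => some c
  | some b => if c > b then some c else some b

def solve_alt (timeSpan : Int) (menu : List Int) (days : Int) : Int :=
  let n : Int := menu.length
  let rz := buildRZ menu
  let best0 : Option Int := if days ≤ 0 ∨ timeSpan > n then some 0 else none
  let best : Option Int :=
    if days > 0 then (PySem.List.pyRange 0 (min timeSpan n) 1).foldl (altStep rz days) best0
    else best0
  -- best is never none under Pre_solve (timeSpan ≥ 1); Python would return None there
  best.getD 0

-- ===== PRECONDITION & SPEC =====
-- Pre_ excludes timeSpan ≤ 0, where A raises ValueError (max() of an empty set).
def Pre_solve (timeSpan : Int) (menu : List Int) (days : Int) : Prop := 1 ≤ timeSpan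
instance (timeSpan : Int) (menu : List Int) (days : Int) : Decidable (Pre_solve timeSpan menu days) := by unfold Pre_solve; infer_instance
def pvWitness_solve : Int × List Int × Int := (3, [2, 5, 0, 7], 2)

def Spec_solve (timeSpan : Int) (menu : List Int) (days : Int) (out : Int) : Prop := out = solve_alt timeSpan menu days
instance (timeSpan : Int) (menu : List Int) (days : Int) (out : Int) : Decidable (Spec_solve timeSpan menu days out) := by unfold Spec_solve; infer_instance

-- ===== CLAIM (what is proved, stated in full; the proofs are below) =====
def Claim_equal_solve : Prop := ∀ (timeSpan : Int) (menu : List Int) (days : Int), Dom_solve timeSpan menu days → Pre_solve timeSpan menu days → Spec_solve timeSpan menu days (solve timeSpan menu days)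

-- ===== LEMMAS AND PROOFS =====

-- the common specification of one window's count
def cnt (menu : List Int) (day : Nat) (days : Int) : Int :=
  (((menu.drop day).take days.toNat).takeWhile (fun v => !(v == 0))).sum

-- a fold whose step fixes every state over this list is the identity
theorem foldl_fix {α β : Type} (L : List β) (f : α → β → α) (st : α)
    (h : ∀ i ∈ L, ∀ s, f s i = s) : L.foldl f st = st := by
  induction L generalizing st with
  | nil => rfl
  | cons x t ih =>
    rw [List.foldl_cons, h x (by simp), ih]
    intro i hi s; exact h i (by simp [hi]) s

-- once the break flag is set the fold never moves
theorem foldl_broken (l : List Int) (c : Int) :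
    l.foldl (fun (st : Int × Bool) v =>
        if st.2 then st else if v = 0 then (st.1, true) else (st.1 + v, st.2)) (c, true)
      = (c, true) := by
  induction l with
  | nil => rfl
  | cons v t ih => simpa using ih

-- the break-flag fold over a plain list computes the sum of the nonzero prefix
theorem foldl_break_sum (l : List Int) (c : Int) :
    (l.foldl (fun (st : Int × Bool) v =>
        if st.2 then st else if v = 0 then (st.1, true) else (st.1 + v, st.2)) (c, false)).1
      = c + (l.takeWhile (fun v => !(v == 0))).sum := by
  induction l generalizing c with
  | nil => simp
  | cons v t ih =>
    rw [List.foldl_cons,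
      show (if ((c, false) : Int × Bool).2 then ((c, false) : Int × Bool)
            else if v = 0 then (c, true) else (c + v, false))
          = (if v = 0 then ((c, true) : Int × Bool) else (c + v, false)) from by simp]
    by_cases hv : v = 0
    · rw [if_pos hv, foldl_broken]
      simp [hv]
    · rw [if_neg hv, ih]
      simp [List.takeWhile_cons, hv]
      ring

theorem solveInner_eq_cnt (menu : List Int) (day : Int) (hday : 0 ≤ day) (days : Int) :
    solveInner menu day days = cnt menu day.toNat days := by
  by_cases hd : days ≤ 0
  · unfold solveInner cnt
    rw [PySem.List.pyRange_one_eq_nil hd]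
    simp [Int.toNat_of_nonpos hd]
  · replace hd : 0 < days := by omega
    unfold solveInner cnt
    set fA := fun (st : Int × Bool) (i : Int) =>
      if st.2 then st else
      match PySem.List.pyGet? menu (day + i) with
      | none => st
      | some v => if v = 0 then (st.1, true) else (st.1 + v, st.2) with hfA
    set g := fun (st : Int × Bool) (v : Int) =>
      if st.2 then st else if v = 0 then (st.1, true) else (st.1 + v, st.2) with hg
    set l : List Int := menu.drop day.toNat with hl
    set lt : List Int := l.take days.toNat with hlt
    have hlen : l.length = menu.length - day.toNat := by simp [hl]
    have hltlen : lt.length = min days.toNat l.length := by simp [hlt]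
    have hm0 : (0 : Int) ≤ (lt.length : Int) := by positivity
    have hmd : (lt.length : Int) ≤ days := by omega
    rw [PySem.List.pyRange_one_append 0 (lt.length : Int) days hm0 hmd, List.foldl_append]
    -- the tail of the range only sees out-of-range indices: the fold fixes the state
    have htail : ∀ i ∈ PySem.List.pyRange (lt.length : Int) days 1, ∀ s, fA s i = s := by
      intro i hi s
      rw [PySem.List.mem_pyRange_one] at hi
      have hbig : l.length ≤ i.toNat := by omega
      have hnone : PySem.List.pyGet? menu (day + i) = none := by
        rw [PySem.List.pyGet?_of_nonneg menu (by omega)]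
        apply List.getElem?_eq_none
        omega
      simp [hfA, hnone]
    rw [foldl_fix _ _ _ htail]
    -- the head of the range sees exactly the elements of lt
    have hhead : ∀ (acc : Int × Bool), ∀ i ∈ PySem.List.pyRange 0 (lt.length : Int) 1,
        fA acc i = g acc (PySem.List.pyGetD lt i 0) := by
      intro acc i hi
      rw [PySem.List.mem_pyRange_one] at hi
      have hilt : i.toNat < lt.length := by omega
      have hill : i.toNat < l.length := by omega
      have himenu : day.toNat + i.toNat < menu.length := by omega
      have hget : PySem.List.pyGet? menu (day + i) = some lt[i.toNat] := by
        rw [PySem.List.pyGet?_of_nonneg menu (by omega)]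
        have htn : (day + i).toNat = day.toNat + i.toNat := by omega
        rw [htn, List.getElem?_eq_getElem (by omega)]
        simp only [hlt, hl, List.getElem_take, List.getElem_drop]
      rw [PySem.List.pyGetD_eq_getElem lt 0 (by omega) hi.2]
      simp [hfA, hg, hget]
    rw [PySem.List.foldl_congr_mem _ fA (fun st i => g st (PySem.List.pyGetD lt i 0)) _ hhead,
      PySem.List.foldl_pyRange_zero_pyGetD' lt 0 g ((0 : Int), false), hg, foldl_break_sum]
    simp

theorem buildRZ_cons (v : Int) (t : List Int) :
    buildRZ (v :: t) =
      (if v = 0 then (0 :: (buildRZ t).1, 0 :: (buildRZ t).2)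
       else ((v + (buildRZ t).1.headD 0) :: (buildRZ t).1,
             (1 + (buildRZ t).2.headD 0) :: (buildRZ t).2)) := by
  simp only [buildRZ, List.reverse_cons, List.foldl_append, List.foldl_cons, List.foldl_nil]

theorem buildRZ_spec (menu : List Int) :
    (buildRZ menu).1 = (List.range (menu.length + 1)).map
        (fun i => ((menu.drop i).takeWhile (fun v => !(v == 0))).sum) ∧
    (buildRZ menu).2 = (List.range (menu.length + 1)).map
        (fun i => (((menu.drop i).takeWhile (fun v => !(v == 0))).length : Int)) := by
  induction menu with
  | nil => constructor <;> rfl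
  | cons v t ih =>
    have hhead1 : (buildRZ t).1.headD 0 = (t.takeWhile (fun v => !(v == 0))).sum := by
      rw [ih.1, List.range_succ_eq_map]; simp
    have hhead2 : (buildRZ t).2.headD 0 = ((t.takeWhile (fun v => !(v == 0))).length : Int) := by
      rw [ih.2, List.range_succ_eq_map]; simp
    rw [buildRZ_cons]
    constructor
    · by_cases hv : v = 0 <;>
        simp [hv, List.range_succ_eq_map, ih.1, hhead1, List.takeWhile_cons,
          Function.comp_def, List.map_map]
    · by_cases hv : v = 0 <;>
      · rw [show (v :: t).length + 1 = ((t.length + 1) + 1) by simp, List.range_succ_eq_map]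
        simp [hv, List.range_succ_eq_map, ih.2, hhead2, Function.comp_def, List.map_map,
          List.takeWhile_cons]
        try ring


-- takeWhile commutes with take
theorem takeWhile_take (p : Int → Bool) (l : List Int) (k : Nat) :
    (l.take k).takeWhile p = (l.takeWhile p).take k := by
  induction l generalizing k with
  | nil => simp
  | cons v t ih =>
    cases k with
    | zero => simp
    | succ k =>
      by_cases hv : p v
      · simp [List.takeWhile_cons, hv, ih]
      · simp [List.takeWhile_cons, hv]

-- a takeWhile prefix splits at any point not past its length
theorem takeWhile_split (p : Int → Bool) (k : Nat) (l : List Int)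
    (h : k ≤ (l.takeWhile p).length) :
    l.takeWhile p = l.take k ++ (l.drop k).takeWhile p := by
  induction k generalizing l with
  | zero => simp
  | succ k ih =>
    cases l with
    | nil => simp at h
    | cons v t =>
      by_cases hv : p v
      · simp only [List.takeWhile_cons, hv, if_true, List.take_succ_cons, List.drop_succ_cons,
          List.cons_append]
        rw [ih t (by simp [List.takeWhile_cons, hv] at h; omega)]
      · simp [List.takeWhile_cons, hv] at h

theorem len_takeWhile_le (p : Int → Bool) (l : List Int) :
    (l.takeWhile p).length ≤ l.length := by
  induction l with
  | nil => simp
  | cons v t ih => by_cases hv : p v <;> simp [List.takeWhile_cons, hv] <;> omega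

-- the window count Source B computes from rs/zs (proof-side abbreviation of altStep's c)
def altC (rz : List Int × List Int) (days : Int) (day : Int) : Int :=
  if PySem.List.pyGetD rz.2 day 0 ≤ days then PySem.List.pyGetD rz.1 day 0
  else PySem.List.pyGetD rz.1 day 0 - PySem.List.pyGetD rz.1 (day + days) 0

theorem altStep_none (rz : List Int × List Int) (days day : Int) :
    altStep rz days none day = some (altC rz days day) := rfl

theorem altStep_some (rz : List Int × List Int) (days day b : Int) :
    altStep rz days (some b) day = some (max b (altC rz days day)) := by
  rw [show altStep rz days (some b) day
      = if altC rz days day > b then some (altC rz days day) else some b from rfl]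
  split_ifs with h <;> (congr 1; omega)

theorem altStep_fold_some (rz : List Int × List Int) (days : Int) (L : List Int) (x : Int) :
    L.foldl (altStep rz days) (some x)
      = some (L.foldl (fun acc day => max acc (altC rz days day)) x) := by
  induction L generalizing x with
  | nil => rfl
  | cons d t ih => rw [List.foldl_cons, altStep_some, ih, List.foldl_cons]

-- the running max is its seed or one of the candidates
theorem foldl_max_mem_int (cf : Int → Int) (L : List Int) (x : Int) :
    L.foldl (fun acc day => max acc (cf day)) x = x ∨
      ∃ d ∈ L, L.foldl (fun acc day => max acc (cf day)) x = cf d := by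
  induction L generalizing x with
  | nil => left; rfl
  | cons d t ih =>
    rw [List.foldl_cons]
    rcases ih (max x (cf d)) with h | ⟨e, he, h⟩
    · rcases max_choice x (cf d) with hm | hm
      · left; rw [h, hm]
      · right; exact ⟨d, by simp, by rw [h, hm]⟩
    · right; exact ⟨e, by simp [he], h⟩

-- altC computes exactly A's window count, for a start inside the list and days ≥ 1
theorem altC_eq_cnt (menu : List Int) (days : Int) (hd : 1 ≤ days) (day : Int)
    (h0 : 0 ≤ day) (h1 : day < (menu.length : Int)) :
    altC (buildRZ menu) days day = cnt menu day.toNat days := by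
  obtain ⟨hrs, hzs⟩ := buildRZ_spec menu
  have hrsget : ∀ (i : Int), 0 ≤ i → i ≤ (menu.length : Int) →
      PySem.List.pyGetD (buildRZ menu).1 i 0
        = ((menu.drop i.toNat).takeWhile (fun v => !(v == 0))).sum := by
    intro i hi0 hi1
    rw [hrs, PySem.List.pyGetD_eq_getElem _ 0 hi0 (by simp; omega)]
    simp
  have hzsget : PySem.List.pyGetD (buildRZ menu).2 day 0
      = (((menu.drop day.toNat).takeWhile (fun v => !(v == 0))).length : Int) := by
    rw [hzs, PySem.List.pyGetD_eq_getElem _ 0 h0 (by simp; omega)]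
    simp
  set l : List Int := menu.drop day.toNat with hl
  set w : List Int := l.takeWhile (fun v => !(v == 0)) with hw
  have hwl : w.length ≤ l.length := by rw [hw]; exact len_takeWhile_le _ l
  have hll : l.length = menu.length - day.toNat := by simp [hl]
  unfold altC cnt
  rw [hzsget, hrsget day h0 (by omega)]
  by_cases hz : (w.length : Int) ≤ days
  · rw [if_pos hz, ← hl, takeWhile_take, ← hw, List.take_of_length_le (by omega)]
  · rw [if_neg hz]
    set k : Nat := days.toNat with hk
    have hkw : k ≤ w.length := by omega
    have hkl : k ≤ l.length := by omega
    have hsplit := takeWhile_split (fun v => !(v == 0)) k l (by rw [hw] at hkw; exact hkw)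
    have hdrop : menu.drop (day + days).toNat = l.drop k := by
      rw [hl, List.drop_drop]
      congr 1
      omega
    rw [hrsget (day + days) (by omega) (by omega), hdrop]
    have hsum : w.sum = (l.take k).sum + ((l.drop k).takeWhile (fun v => !(v == 0))).sum := by
      rw [hw, hsplit, List.sum_append]
    have htk : (l.take k).takeWhile (fun v => !(v == 0)) = l.take k := by
      have hwtk : w.take k = l.take k := by
        rw [hw, hsplit, List.take_append_of_le_length (by rw [List.length_take]; omega),
          List.take_take, min_self]
      rw [takeWhile_take, ← hw, hwtk]
    rw [← hl, htk, ← hw]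
    omega

-- ===== VERDICT (by name: the statement is the Claim_ definition above) =====
theorem solve_spec : Claim_equal_solve := by
  intro ts menu days _ hpre
  unfold Pre_solve at hpre
  unfold Spec_solve
  set n : Int := (menu.length : Int) with hn
  set f : Int → Int := fun day => solveInner menu day days with hf
  have hn0 : 0 ≤ n := by positivity
  -- A's set of window counts is the deduplicated list of counts over the days
  set V : List Int := (PySem.List.pyRange 0 ts 1).map f with hV
  have hamounts : solve ts menu days
      = (PySem.List.max? (PySem.Set.ofList V) (fun x => x)).getD 0 := by
    unfold solve
    rw [hV, hf]
    rw [← PySem.Set.update_map_eq_foldl_add]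
    rfl
  have hVmem : ∀ y, y ∈ V ↔ ∃ day, 0 ≤ day ∧ day < ts ∧ y = f day := by
    intro y
    rw [hV]
    simp only [List.mem_map, PySem.List.mem_pyRange_one]
    constructor
    · rintro ⟨d, ⟨h1, h2⟩, h3⟩; exact ⟨d, h1, h2, h3.symm⟩
    · rintro ⟨d, h1, h2, h3⟩; exact ⟨d, ⟨h1, h2⟩, h3.symm⟩
  have hV0 : V = f 0 :: (PySem.List.pyRange 1 ts 1).map f := by
    rw [hV, PySem.List.pyRange_one_cons (by omega : (0:Int) < ts)]
    simp
  have hSne : PySem.Set.ofList V ≠ [] := by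
    rw [hV0, PySem.Set.ofList_cons]
    simp
  obtain ⟨a, hmax⟩ : ∃ a, PySem.List.max? (PySem.Set.ofList V) (fun x => x) = some a := by
    cases hc : PySem.List.max? (PySem.Set.ofList V) (fun x => x) with
    | none => exact absurd ((PySem.List.max?_eq_none_iff _ _).mp hc) hSne
    | some a => exact ⟨a, rfl⟩
  have haV : ∃ day, 0 ≤ day ∧ day < ts ∧ a = f day :=
    (hVmem a).mp ((PySem.Set.mem_ofList V a).mp (PySem.List.max?_mem hmax))
  have haub : ∀ day, 0 ≤ day → day < ts → f day ≤ a := by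
    intro day h1 h2
    exact PySem.List.max?_isMax hmax (f day)
      ((PySem.Set.mem_ofList V (f day)).mpr ((hVmem (f day)).mpr ⟨day, h1, h2, rfl⟩))
  rw [hamounts, hmax, Option.getD_some]
  -- facts about A's window count
  have hf_big : ∀ day : Int, n ≤ day → f day = 0 := by
    intro day h
    rw [hf]
    simp only
    rw [solveInner_eq_cnt menu day (by omega) days]
    unfold cnt
    rw [List.drop_eq_nil_of_le (by omega)]
    simp
  by_cases hdpos : 0 < days
  · -- altC agrees with f inside the list
    have hcf : ∀ day : Int, 0 ≤ day → day < n → altC (buildRZ menu) days day = f day := by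
      intro day h1 h2
      rw [altC_eq_cnt menu days (by omega) day h1 h2, hf]
      simp only
      rw [solveInner_eq_cnt menu day h1 days]
    unfold solve_alt
    simp only [← hn]
    rw [if_pos hdpos]
    by_cases hts : n < ts
    · -- extra seed 0 for the out-of-range days
      rw [if_pos (Or.inr hts), min_eq_right (by omega), altStep_fold_some, Option.getD_some]
      set B := (PySem.List.pyRange 0 n 1).foldl
        (fun acc day => max acc (altC (buildRZ menu) days day)) 0 with hB
      have hub := PySem.List.le_foldl_max_int (PySem.List.pyRange 0 n 1)
        (fun day => altC (buildRZ menu) days day) 0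
      have hle : a ≤ B := by
        obtain ⟨d0, h1, h2, h3⟩ := haV
        by_cases hd0 : d0 < n
        · rw [h3, ← hcf d0 h1 hd0]
          exact hub.2 d0 (PySem.List.mem_pyRange_one.mpr ⟨h1, hd0⟩)
        · rw [h3, hf_big d0 (by omega)]
          exact hub.1
      have hge : B ≤ a := by
        rcases foldl_max_mem_int (fun day => altC (buildRZ menu) days day)
            (PySem.List.pyRange 0 n 1) 0 with h | ⟨d, hd, h⟩
        · rw [← hB] at h
          rw [h, ← hf_big n (le_refl n)]
          exact haub n hn0 hts
        · rw [PySem.List.mem_pyRange_one] at hd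
          rw [← hB] at h
          rw [h, hcf d hd.1 hd.2]
          exact haub d hd.1 (by omega)
      omega
    · -- every considered day is inside the list
      rw [if_neg (by omega), min_eq_left (by omega),
        PySem.List.pyRange_one_cons (by omega : (0:Int) < ts), List.foldl_cons, altStep_none,
        altStep_fold_some, Option.getD_some, show (0:Int) + 1 = 1 from by norm_num]
      set B := (PySem.List.pyRange 1 ts 1).foldl
        (fun acc day => max acc (altC (buildRZ menu) days day)) (altC (buildRZ menu) days 0) with hB
      have hub := PySem.List.le_foldl_max_int (PySem.List.pyRange 1 ts 1)
        (fun day => altC (buildRZ menu) days day) (altC (buildRZ menu) days 0)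
      have hle : a ≤ B := by
        obtain ⟨d0, h1, h2, h3⟩ := haV
        have hd0n : d0 < n := by omega
        by_cases hz : d0 = 0
        · rw [h3, ← hcf d0 h1 hd0n, hz]
          simpa using hub.1
        · rw [h3, ← hcf d0 h1 hd0n]
          exact hub.2 d0 (PySem.List.mem_pyRange_one.mpr ⟨by omega, h2⟩)
      have hge : B ≤ a := by
        rcases foldl_max_mem_int (fun day => altC (buildRZ menu) days day)
            (PySem.List.pyRange 1 ts 1) (altC (buildRZ menu) days 0) with h | ⟨d, hd, h⟩
        · rw [← hB] at h
          rw [h, hcf 0 (le_refl 0) (by omega)]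
          exact haub 0 (le_refl 0) (by omega)
        · rw [PySem.List.mem_pyRange_one] at hd
          rw [← hB] at h
          rw [h, hcf d (by omega) (by omega)]
          exact haub d (by omega) hd.2
      omega
  · -- days ≤ 0: every count is 0 on both sides
    have hf0 : ∀ day : Int, 0 ≤ day → f day = 0 := by
      intro day h
      rw [hf]
      simp only
      rw [solveInner_eq_cnt menu day h days]
      unfold cnt
      simp [Int.toNat_of_nonpos (by omega : days ≤ 0)]
    have ha0 : a = 0 := by
      obtain ⟨d0, h1, _, h3⟩ := haV
      rw [h3, hf0 d0 h1]
    unfold solve_alt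
    simp only [← hn]
    rw [if_neg hdpos, if_pos (Or.inl (by omega)), Option.getD_some, ha0]
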